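-- pv_equiv track=rewrite | github.com/yehoon17/programmers | 호텔_방_배정.py | solution
-- ===== SOURCE A (Python) =====
-- def solution(k, room_number):
--     answer = []
--     redirect = {}
--     for request in room_number:
--         requested = []
--         while True:
--             requested.append(request)
--             redirect.setdefault(request, request)
--             if request == redirect[request]:
--                 break
--             request = redirect[request]
--
--         answer.append(request)
--         available = request + 1
--         for request in requested:
--             redirect[request] = available
--
--     return answer
-- ===== SOURCE B (Python) =====
-- def solution(k, room_number):
--     # Occupied rooms kept as a sorted list `ivs` of disjoint, non-adjacent,
--     # inclusive intervals (start, end).  The first free room >= request is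
--     # request itself if no interval covers it, else end+1 of the covering
--     # interval; the assigned room is then inserted, merging neighbours.
--     answer = []
--     ivs = []
--     for request in room_number:
--         # rightmost interval with start <= request, by binary search
--         lo, hi = 0, len(ivs)
--         while lo < hi:
--             mid = (lo + hi) // 2
--             if ivs[mid][0] <= request:
--                 lo = mid + 1
--             else:
--                 hi = mid
--         i = lo - 1
--         if i >= 0 and request <= ivs[i][1]:
--             room = ivs[i][1] + 1
--         else:
--             room = request
--         answer.append(room)
--         j = i + 1  # room lies strictly between interval i and interval j
--         merge_left = i >= 0 and ivs[i][1] == room - 1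
--         merge_right = j < len(ivs) and ivs[j][0] == room + 1
--         if merge_left and merge_right:
--             ivs[i] = (ivs[i][0], ivs[j][1])
--             del ivs[j]
--         elif merge_left:
--             ivs[i] = (ivs[i][0], room)
--         elif merge_right:
--             ivs[j] = (room, ivs[j][1])
--         else:
--             ivs.insert(j, (room, room))
--     return answer
-- ===== Notes on version B (the rewrite author's own statement) =====
-- stated objective: alternative
-- what changed: The redirect dictionary with pointer-chasing and path rewriting is replaced by a sorted list of disjoint, non-adjacent occupied intervals: a binary search locates the interval covering the request (answer = its end + 1, or the request itself when uncovered), and the assigned room is spliced in, merging with adjacent intervals.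
import Mathlib
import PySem

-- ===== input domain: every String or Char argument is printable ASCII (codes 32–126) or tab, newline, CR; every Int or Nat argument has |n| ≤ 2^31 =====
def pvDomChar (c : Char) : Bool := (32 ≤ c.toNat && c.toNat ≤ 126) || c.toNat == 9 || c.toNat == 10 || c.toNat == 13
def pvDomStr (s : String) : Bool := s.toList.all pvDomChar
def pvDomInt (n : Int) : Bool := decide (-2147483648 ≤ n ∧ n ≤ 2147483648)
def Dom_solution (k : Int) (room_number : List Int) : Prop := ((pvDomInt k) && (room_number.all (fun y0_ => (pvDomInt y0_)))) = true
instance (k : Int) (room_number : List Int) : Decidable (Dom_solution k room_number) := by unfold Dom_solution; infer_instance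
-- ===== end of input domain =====

-- B replaces A's redirect dictionary (pointer chains with path rewriting) by a sorted list of
-- disjoint, non-adjacent occupied intervals maintained by binary search and splicing;
-- objective: alternative data structure, same return values.

-- ===== PORT A =====
-- the `while True` chain walk of A; `fuel` is a totality guard only (proved never to run out
-- when called from `solution`, where the chain is strictly increasing and so finite)
def chaseA (fuel : Nat) (redirect : PySem.Dict Int Int) (request : Int)
    (requested : List Int) : List Int × Int × PySem.Dict Int Int :=
  match fuel with
  | 0 => (requested ++ [request], request, redirect)
  | fuel + 1 =>
    let requested' := requested ++ [request]
    let redirect' := redirect.setdefault request request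
    let v := redirect'.getD request request
    if request = v then (requested', request, redirect')
    else chaseA fuel redirect' v requested'

def solution (k : Int) (room_number : List Int) : List Int :=
  (room_number.foldl
    (fun (st : List Int × PySem.Dict Int Int) request =>
      let res := chaseA (st.2.size + 2) st.2 request []
      let available := res.2.1 + 1
      (st.1 ++ [res.2.1], res.1.foldl (fun dd r => dd.insert r available) res.2.2))
    (([] : List Int), (PySem.Dict.empty : PySem.Dict Int Int))).1

-- ===== PORT B =====
-- Source B's hand-written binary search `while lo < hi`; lo, hi are list indices (always ≥ 0),
-- `fuel` = hi - lo is a totality guard only; ivs[mid] is always in range when called below.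
def bsearchB (ivs : List (Int × Int)) (request : Int) : Nat → Nat → Nat → Nat
  | 0, lo, _ => lo
  | fuel + 1, lo, hi =>
    if lo < hi then
      let mid := (lo + hi) / 2
      if (PySem.List.pyGetD ivs (mid : Int) (0, 0)).1 ≤ request then
        bsearchB ivs request fuel (mid + 1) hi
      else bsearchB ivs request fuel lo mid
    else lo

-- one iteration of Source B's for-loop: answer the request and splice the room into the
-- interval list (ivs[:i] / ivs[j:] are Python slices with non-negative bounds)
def stepB (st : List Int × List (Int × Int)) (request : Int) : List Int × List (Int × Int) :=
  let ivs := st.2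
  let lo := bsearchB ivs request ivs.length 0 ivs.length
  let i : Int := (lo : Int) - 1
  let room := if 0 ≤ i ∧ request ≤ (PySem.List.pyGetD ivs i (0, 0)).2
              then (PySem.List.pyGetD ivs i (0, 0)).2 + 1 else request
  let j : Int := i + 1
  let mergeL := decide (0 ≤ i ∧ (PySem.List.pyGetD ivs i (0, 0)).2 = room - 1)
  let mergeR := decide (j < (ivs.length : Int) ∧ (PySem.List.pyGetD ivs j (0, 0)).1 = room + 1)
  let ivs' :=
    if mergeL && mergeR then
      -- ivs[i] = (ivs[i][0], ivs[j][1]); del ivs[j]  — i, j are in range here and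
      -- j ≥ 0, so List.eraseIdx j.toNat is exact for Python's `del ivs[j]`
      (PySem.List.pySetD ivs i
        ((PySem.List.pyGetD ivs i (0, 0)).1, (PySem.List.pyGetD ivs j (0, 0)).2)).eraseIdx j.toNat
    else if mergeL then
      PySem.List.pySetD ivs i ((PySem.List.pyGetD ivs i (0, 0)).1, room)
    else if mergeR then
      PySem.List.pySetD ivs j (room, (PySem.List.pyGetD ivs j (0, 0)).2)
    else
      PySem.List.insert ivs j (room, room)
  (st.1 ++ [room], ivs')

def solution_alt (k : Int) (room_number : List Int) : List Int :=
  (room_number.foldl stepB (([] : List Int), ([] : List (Int × Int)))).1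

-- ===== PRECONDITION & SPEC =====
def Spec_solution (k : Int) (room_number : List Int) (out : List Int) : Prop := out = solution_alt k room_number
instance (k : Int) (room_number : List Int) (out : List Int) : Decidable (Spec_solution k room_number out) := by unfold Spec_solution; infer_instance

-- ===== CLAIM (what is proved, stated in full; the proofs are below) =====
def Claim_equal_solution : Prop := ∀ (k : Int) (room_number : List Int), Dom_solution k room_number → Spec_solution k room_number (solution k room_number)

-- ===== LEMMAS AND PROOFS =====

-- ---- shared abstractions (proof-side only) ----

-- start / end of interval idx (total accessors)
def fstI (ivs : List (Int × Int)) (idx : Nat) : Int := (ivs.getD idx (0, 0)).1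
def sndI (ivs : List (Int × Int)) (idx : Nat) : Int := (ivs.getD idx (0, 0)).2

-- y is covered by some interval of ivs
def coveredI (ivs : List (Int × Int)) (y : Int) : Prop :=
  ∃ idx, idx < ivs.length ∧ fstI ivs idx ≤ y ∧ y ≤ sndI ivs idx

-- B's invariant: sorted, disjoint, non-adjacent, well-formed intervals
def IvsOK (ivs : List (Int × Int)) : Prop :=
  (∀ idx, idx < ivs.length → fstI ivs idx ≤ sndI ivs idx) ∧
  (∀ idx, idx + 1 < ivs.length → sndI ivs idx + 1 < fstI ivs (idx + 1))

-- A's invariant: every entry x ↦ v has x < v and all rooms in [x, v) occupied (= keys)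
def InvA (d : PySem.Dict Int Int) : Prop :=
  d.keys.Nodup ∧ ∀ p ∈ d.items, p.1 < p.2 ∧ ∀ y, p.1 ≤ y → y < p.2 → d.contains y = true

-- the glue: dict keys and interval coverage describe the same occupied set
def RelAB (d : PySem.Dict Int Int) (ivs : List (Int × Int)) : Prop :=
  InvA d ∧ IvsOK ivs ∧ ∀ y, d.contains y = true ↔ coveredI ivs y

-- ---- A-side: the redirect chain ----

def ChainOK (d : PySem.Dict Int Int) : List Int → Int → Prop
  | [], _ => False
  | [y], r => y = r ∧ (d.contains y = false ∨ d.getD y y = y)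
  | y :: z :: t, r => d.contains y = true ∧ d.getD y y = z ∧ y ≠ z ∧ ChainOK d (z :: t) r

theorem len_filter_lt (l : List Int) (p : Int → Bool) (x : Int) (hx : x ∈ l) (hp : p x = false) : (l.filter p).length < l.length := by
  induction l with
  | nil => simp at hx
  | cons a t ih =>
    rcases List.mem_cons.mp hx with rfl | hx
    · simp only [List.filter_cons, hp, if_neg, Bool.false_eq_true, not_false_iff, List.length_cons]
      have := List.length_filter_le p t; omega
    · by_cases ha : p a <;> simp only [List.filter_cons, ha, if_pos, if_neg, Bool.false_eq_true, not_false_iff, List.length_cons]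
      · exact Nat.succ_lt_succ (ih hx)
      · exact Nat.lt_succ_of_lt (ih hx)

theorem getD_mem_items (d : PySem.Dict Int Int) (x : Int) (hc : d.contains x = true) :
    (x, d.getD x x) ∈ d.items := by
  have h := PySem.Dict.contains_eq_isSome_get? (d := d) (k := x)
  rw [hc] at h
  obtain ⟨v, hv⟩ := Option.isSome_iff_exists.mp h.symm
  have : d.getD x x = v := PySem.Dict.getD_of_get?_eq_some d x hv
  rw [this]
  exact PySem.Dict.mem_items_of_get?_eq_some d hv

theorem exists_chain_aux (d : PySem.Dict Int Int) (hinv : InvA d) :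
    ∀ (n : Nat) (x : Int), (d.keys.filter (fun y => decide (x < y))).length ≤ n →
    ∃ t r, ChainOK d (x :: t) r := by
  intro n
  induction n with
  | zero =>
    intro x hn
    by_cases hc : d.contains x = true
    · by_cases hv : d.getD x x = x
      · exact ⟨[], x, rfl, Or.inr hv⟩
      · set v := d.getD x x with hvdef
        have hmem := getD_mem_items d x hc
        have hxv : x < v := (hinv.2 _ hmem).1
        by_cases hcv : d.contains v = true
        · exfalso
          have hvk : v ∈ d.keys := (PySem.Dict.contains_iff_mem_keys d v).mp hcv
          have : v ∈ d.keys.filter (fun y => decide (x < y)) := by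
            simp [List.mem_filter, hvk, hxv]
          have := List.length_pos_of_mem this; omega
        · exact ⟨[v], v, hc, hvdef.symm, fun h => hv h.symm, by
            exact ⟨rfl, Or.inl (by simpa using hcv)⟩⟩
    · exact ⟨[], x, rfl, Or.inl (by simpa using hc)⟩
  | succ n ih =>
    intro x hn
    by_cases hc : d.contains x = true
    · by_cases hv : d.getD x x = x
      · exact ⟨[], x, rfl, Or.inr hv⟩
      · set v := d.getD x x with hvdef
        have hmem := getD_mem_items d x hc
        have hxv : x < v := (hinv.2 _ hmem).1
        by_cases hcv : d.contains v = true
        · have hvk : v ∈ d.keys := (PySem.Dict.contains_iff_mem_keys d v).mp hcv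
          have hsub : d.keys.filter (fun y => decide (v < y))
              = (d.keys.filter (fun y => decide (x < y))).filter (fun y => decide (v < y)) := by
            rw [List.filter_filter]
            apply List.filter_congr
            intro a _
            by_cases hva : v < a
            · simp [hva, lt_trans hxv hva]
            · simp [hva]
          have hlt : (d.keys.filter (fun y => decide (v < y))).length ≤ n := by
            rw [hsub]
            have hvK : v ∈ d.keys.filter (fun y => decide (x < y)) := by
              simp [List.mem_filter, hvk, hxv]
            have := len_filter_lt _ (fun y => decide (v < y)) v hvK (by simp)
            omega
          obtain ⟨t, r, hch⟩ := ih v hlt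
          exact ⟨v :: t, r, hc, hvdef.symm, fun h => hv h.symm, hch⟩
        · exact ⟨[v], v, hc, hvdef.symm, fun h => hv h.symm, ⟨rfl, Or.inl (by simpa using hcv)⟩⟩
    · exact ⟨[], x, rfl, Or.inl (by simpa using hc)⟩

theorem exists_chain (d : PySem.Dict Int Int) (x : Int) (hinv : InvA d) :
    ∃ t r, ChainOK d (x :: t) r :=
  exists_chain_aux d hinv _ x le_rfl

theorem chainOK_shape (d : PySem.Dict Int Int) :
    ∀ (p : List Int) (r : Int), ChainOK d p r →
    ∃ q, p = q ++ [r] ∧ ∀ y ∈ q, d.contains y = true := by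
  intro p
  induction p with
  | nil => intro r h; exact absurd h (by simp [ChainOK])
  | cons a t ih =>
    intro r h
    cases t with
    | nil => exact ⟨[], by simpa using h.1, by simp⟩
    | cons z t' =>
      obtain ⟨hc, hg, hne, hch⟩ := h
      obtain ⟨q, hq, hq2⟩ := ih r hch
      exact ⟨a :: q, by simp [hq], by
        intro y hy
        rcases List.mem_cons.mp hy with rfl | hy
        · exact hc
        · exact hq2 y hy⟩

theorem chain_increasing (d : PySem.Dict Int Int) (hinv : InvA d) :
    ∀ (p : List Int) (r : Int), ChainOK d p r → p.IsChain (· < ·) := by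
  intro p
  induction p with
  | nil => intro r h; exact absurd h (by simp [ChainOK])
  | cons a t ih =>
    intro r h
    cases t with
    | nil => simp
    | cons z t' =>
      obtain ⟨hc, hg, hne, hch⟩ := h
      have hmem := getD_mem_items d a hc
      rw [hg] at hmem
      have haz : a < z := (hinv.2 _ hmem).1
      exact (List.isChain_cons_cons).mpr ⟨haz, ih r hch⟩

-- every chain element e satisfies e ≤ r, and all rooms in [e, r) are occupied
theorem chain_elems (d : PySem.Dict Int Int) (hinv : InvA d) :
    ∀ (p : List Int) (r : Int), ChainOK d p r →
    ∀ e ∈ p, e ≤ r ∧ ∀ y, e ≤ y → y < r → d.contains y = true := by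
  intro p
  induction p with
  | nil => intro r h; exact absurd h (by simp [ChainOK])
  | cons a t ih =>
    intro r h
    cases t with
    | nil =>
      obtain ⟨rfl, -⟩ := h
      intro e he
      have : e = a := by simpa using he
      subst this
      exact ⟨le_rfl, fun y hy1 hy2 => absurd (lt_of_le_of_lt hy1 hy2) (lt_irrefl _)⟩
    | cons z t' =>
      obtain ⟨hc, hg, hne, hch⟩ := h
      have hmem := getD_mem_items d a hc
      rw [hg] at hmem
      obtain ⟨haz, hseg⟩ := hinv.2 _ hmem
      have hz := ih r hch z (by simp)
      intro e he
      rcases List.mem_cons.mp he with rfl | he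
      · refine ⟨le_trans haz.le hz.1, ?_⟩
        intro y hy1 hy2
        by_cases hyz : y < z
        · exact hseg y hy1 hyz
        · exact hz.2 y (le_of_not_gt hyz) hy2
      · exact ih r hch e he

theorem chain_root_free (d : PySem.Dict Int Int) (hinv : InvA d) :
    ∀ (p : List Int) (r : Int), ChainOK d p r → d.contains r = false := by
  intro p
  induction p with
  | nil => intro r h; exact absurd h (by simp [ChainOK])
  | cons a t ih =>
    intro r h
    cases t with
    | nil =>
      obtain ⟨rfl, h2⟩ := h
      rcases h2 with h2 | h2
      · exact h2
      · by_contra hc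
        have hc' : d.contains a = true := by simpa using hc
        have hmem := getD_mem_items d a hc'
        rw [h2] at hmem
        exact absurd (hinv.2 _ hmem).1 (lt_irrefl _)
    | cons z t' => exact ih r h.2.2.2

theorem chain_chaseA (d : PySem.Dict Int Int) :
    ∀ (t : List Int) (r x : Int) (acc : List Int) (fuel : Nat),
    ChainOK d (x :: t) r → (x :: t).length ≤ fuel →
    chaseA fuel d x acc =
      (acc ++ x :: t, r, if d.contains r then d else d.insert r r) := by
  intro t
  induction t generalizing d with
  | nil =>
    intro r x acc fuel h hf
    obtain ⟨rfl, h2⟩ := h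
    obtain ⟨f, rfl⟩ : ∃ f, fuel = f + 1 := ⟨fuel - 1, by simp at hf; omega⟩
    rcases h2 with h2 | h2
    · rw [chaseA]
      simp only [PySem.Dict.setdefault_of_not_contains d x h2,
        PySem.Dict.getD_insert_self, h2]
      simp
    · by_cases hc : d.contains x = true
      · rw [chaseA]
        simp only [PySem.Dict.setdefault_of_contains d x hc, h2, hc]
        simp
      · rw [chaseA]
        simp only [PySem.Dict.setdefault_of_not_contains d x (by simpa using hc),
          PySem.Dict.getD_insert_self]
        simp [hc]
  | cons z t' ih =>
    intro r x acc fuel h hf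
    obtain ⟨hc, hg, hne, hch⟩ := h
    obtain ⟨f, rfl⟩ : ∃ f, fuel = f + 1 := ⟨fuel - 1, by simp at hf; omega⟩
    rw [chaseA]
    simp only [PySem.Dict.setdefault_of_contains d x hc, hg, if_neg hne]
    rw [ih d r z (acc ++ [x]) f hch (by simp at hf ⊢; omega)]
    simp

theorem get?_foldl_insert_const (w : Int) :
    ∀ (q : List Int) (d : PySem.Dict Int Int) (y : Int),
    (q.foldl (fun dd a => dd.insert a w) d).get? y = if y ∈ q then some w else d.get? y := by
  intro q
  induction q with
  | nil => intro d y; simp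
  | cons a q ih =>
    intro d y
    rw [List.foldl_cons, ih]
    by_cases hy : y ∈ q
    · simp [hy]
    · by_cases hya : y = a
      · subst hya; simp [hy, PySem.Dict.get?_insert_self]
      · simp [hy, hya, PySem.Dict.get?_insert_of_ne d w hya]

-- ---- B-side: splicing and binary search ----

theorem getD_splice {α : Type} (ivs : List α) (a b : Nat) (m : α) (idx : Nat) (dflt : α)
    (ha : a ≤ ivs.length) (_hb : b ≤ ivs.length) :
    (ivs.take a ++ m :: ivs.drop b).getD idx dflt =
      if idx < a then ivs.getD idx dflt
      else if idx = a then m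
      else ivs.getD (b + (idx - a - 1)) dflt := by
  have hlt : (ivs.take a).length = a := by simp [ha]
  rcases lt_trichotomy idx a with h | h | h
  · rw [if_pos h, List.getD_eq_getElem?_getD, List.getElem?_append_left (by omega)]
    rw [List.getElem?_take_of_lt h, List.getD_eq_getElem?_getD]
  · subst h
    rw [if_neg (lt_irrefl _), if_pos rfl, List.getD_eq_getElem?_getD,
      List.getElem?_append_right (by omega)]
    simp [hlt]
  · rw [if_neg (by omega), if_neg (by omega), List.getD_eq_getElem?_getD,
      List.getElem?_append_right (by omega), hlt]
    have : idx - a = (idx - a - 1) + 1 := by omega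
    rw [this]
    simp [List.getElem?_drop, List.getD_eq_getElem?_getD]

theorem length_splice {α : Type} (ivs : List α) (a b : Nat) (m : α)
    (ha : a ≤ ivs.length) (hb : b ≤ ivs.length) :
    (ivs.take a ++ m :: ivs.drop b).length = a + 1 + (ivs.length - b) := by
  simp; omega

-- intervals are separated: i < j → end i < start j
theorem ivs_sep (ivs : List (Int × Int)) (hok : IvsOK ivs) :
    ∀ i j, i < j → j < ivs.length → sndI ivs i + 1 < fstI ivs j := by
  intro i j
  induction j with
  | zero => omega
  | succ j ih =>
    intro hij hj
    rcases Nat.lt_succ_iff_lt_or_eq.mp hij with h | h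
    · have h1 := ih h (by omega)
      have h2 := hok.1 j (by omega)
      have h3 := hok.2 j hj
      omega
    · subst h
      exact hok.2 i hj

theorem bsearch_inv (ivs : List (Int × Int)) (request : Int)
    (hmono : ∀ i j, i ≤ j → j < ivs.length → fstI ivs i ≤ fstI ivs j) :
    ∀ (fuel lo hi : Nat), lo ≤ hi → hi ≤ ivs.length → hi - lo ≤ fuel →
    (∀ idx, idx < lo → fstI ivs idx ≤ request) →
    (∀ idx, hi ≤ idx → idx < ivs.length → request < fstI ivs idx) →
    bsearchB ivs request fuel lo hi ≤ ivs.length ∧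
    (∀ idx, idx < bsearchB ivs request fuel lo hi → fstI ivs idx ≤ request) ∧
    (∀ idx, bsearchB ivs request fuel lo hi ≤ idx → idx < ivs.length →
      request < fstI ivs idx) := by
  intro fuel
  induction fuel with
  | zero =>
    intro lo hi hlh hhi hf hlow hhigh
    have : lo = hi := by omega
    subst this
    rw [bsearchB]
    exact ⟨hhi, hlow, fun idx h1 h2 => hhigh idx h1 h2⟩
  | succ fuel ih =>
    intro lo hi hlh hhi hf hlow hhigh
    rw [bsearchB]
    by_cases hlt : lo < hi
    · rw [if_pos hlt]
      have hmidlt : (lo + hi) / 2 < hi := by omega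
      have hmidge : lo ≤ (lo + hi) / 2 := by omega
      have hmidlen : (lo + hi) / 2 < ivs.length := by omega
      have hgd : (PySem.List.pyGetD ivs (((lo + hi) / 2 : Nat) : Int) (0, 0)).1
          = fstI ivs ((lo + hi) / 2) := by
        rw [PySem.List.pyGetD_natCast]; rfl
      by_cases hc : (PySem.List.pyGetD ivs (((lo + hi) / 2 : Nat) : Int) (0, 0)).1 ≤ request
      · rw [if_pos hc]
        refine ih ((lo + hi) / 2 + 1) hi (by omega) hhi (by omega) ?_ hhigh
        intro idx hidx
        have : fstI ivs idx ≤ fstI ivs ((lo + hi) / 2) := hmono idx _ (by omega) hmidlen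
        rw [hgd] at hc
        omega
      · rw [if_neg hc]
        refine ih lo ((lo + hi) / 2) (by omega) (by omega) (by omega) hlow ?_
        intro idx hidx hlen
        have : fstI ivs ((lo + hi) / 2) ≤ fstI ivs idx := hmono _ idx hidx hlen
        rw [hgd] at hc
        omega
    · rw [if_neg hlt]
      exact ⟨by omega, hlow, fun idx h1 h2 => hhigh idx (by omega) h2⟩

-- `l[k] = m; del l[k+1]` produces the same splice as take/cons/drop
theorem set_eraseIdx_splice {α : Type} (ivs : List α) (k : Nat) (m : α)
    (hk : k + 1 < ivs.length) :
    (ivs.set k m).eraseIdx (k + 1) = ivs.take k ++ m :: ivs.drop (k + 2) := by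
  induction ivs generalizing k with
  | nil => simp at hk
  | cons a l ih =>
    cases k with
    | zero => simp
    | succ k =>
      simp only [List.set, List.eraseIdx, List.take, List.drop]
      rw [ih k (by simpa using hk)]
      rfl

theorem splice_spec (ivs : List (Int × Int)) (a b : Nat) (m : Int × Int)
    (hok : IvsOK ivs) (hab : a ≤ b) (hb : b ≤ ivs.length) (hm : m.1 ≤ m.2)
    (h2 : 0 < a → sndI ivs (a - 1) + 1 < m.1)
    (h3 : b < ivs.length → m.2 + 1 < fstI ivs b) :
    IvsOK (ivs.take a ++ m :: ivs.drop b) ∧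
    (∀ y, coveredI (ivs.take a ++ m :: ivs.drop b) y ↔
      (∃ idx, idx < ivs.length ∧ (idx < a ∨ b ≤ idx) ∧ fstI ivs idx ≤ y ∧ y ≤ sndI ivs idx) ∨
      (m.1 ≤ y ∧ y ≤ m.2)) := by
  have ha : a ≤ ivs.length := le_trans hab hb
  have hlen : (ivs.take a ++ m :: ivs.drop b).length = a + 1 + (ivs.length - b) :=
    length_splice ivs a b m ha hb
  have hf : ∀ idx, fstI (ivs.take a ++ m :: ivs.drop b) idx =
      if idx < a then fstI ivs idx else if idx = a then m.1 else fstI ivs (b + (idx - a - 1)) := by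
    intro idx
    unfold fstI
    rw [getD_splice ivs a b m idx (0, 0) ha hb]
    split_ifs <;> rfl
  have hs : ∀ idx, sndI (ivs.take a ++ m :: ivs.drop b) idx =
      if idx < a then sndI ivs idx else if idx = a then m.2 else sndI ivs (b + (idx - a - 1)) := by
    intro idx
    unfold sndI
    rw [getD_splice ivs a b m idx (0, 0) ha hb]
    split_ifs <;> rfl
  refine ⟨⟨?_, ?_⟩, ?_⟩
  · intro idx hidx
    rw [hlen] at hidx
    rw [hf idx, hs idx]
    split_ifs with c1 c2
    · exact hok.1 idx (by omega)
    · exact hm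
    · exact hok.1 (b + (idx - a - 1)) (by omega)
  · intro idx hidx
    rw [hlen] at hidx
    rw [hs idx, hf (idx + 1)]
    split_ifs with c1 c2 c3 c4 c5 c6 c7
    · exact hok.2 idx (by omega)
    · have he : idx = a - 1 := by omega
      subst he
      exact h2 (by omega)
    · exfalso; omega
    · exfalso; omega
    · exfalso; omega
    · have he : b + (idx + 1 - a - 1) = b := by omega
      rw [he]
      exact h3 (by omega)
    · exfalso; omega
    · exfalso; omega
    · have he : b + (idx + 1 - a - 1) = b + (idx - a - 1) + 1 := by omega
      rw [he]
      exact hok.2 (b + (idx - a - 1)) (by omega)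
  · intro y
    constructor
    · rintro ⟨idx, hidx, hy1, hy2⟩
      rw [hlen] at hidx
      rw [hf idx] at hy1
      rw [hs idx] at hy2
      by_cases c1 : idx < a
      · rw [if_pos c1] at hy1 hy2
        exact Or.inl ⟨idx, by omega, Or.inl c1, hy1, hy2⟩
      · by_cases c2 : idx = a
        · rw [if_neg c1, if_pos c2] at hy1 hy2
          exact Or.inr ⟨hy1, hy2⟩
        · rw [if_neg c1, if_neg c2] at hy1 hy2
          exact Or.inl ⟨b + (idx - a - 1), by omega, Or.inr (by omega), hy1, hy2⟩
    · rintro (⟨idx, hidx, hab', hy1, hy2⟩ | ⟨hy1, hy2⟩)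
      · rcases hab' with hlt | hge
        · refine ⟨idx, by omega, ?_, ?_⟩
          · rw [hf idx, if_pos hlt]; exact hy1
          · rw [hs idx, if_pos hlt]; exact hy2
        · refine ⟨a + 1 + (idx - b), by omega, ?_, ?_⟩
          · have he : b + (a + 1 + (idx - b) - a - 1) = idx := by omega
            rw [hf, if_neg (by omega), if_neg (by omega), he]; exact hy1
          · have he : b + (a + 1 + (idx - b) - a - 1) = idx := by omega
            rw [hs, if_neg (by omega), if_neg (by omega), he]; exact hy2
      · refine ⟨a, by omega, ?_, ?_⟩
        · rw [hf a, if_neg (lt_irrefl a), if_pos rfl]; exact hy1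
        · rw [hs a, if_neg (lt_irrefl a), if_pos rfl]; exact hy2

def roomOf (ivs : List (Int × Int)) (request : Int) : Int :=
  let lo := bsearchB ivs request ivs.length 0 ivs.length
  let i : Int := (lo : Int) - 1
  if 0 ≤ i ∧ request ≤ (PySem.List.pyGetD ivs i (0, 0)).2
  then (PySem.List.pyGetD ivs i (0, 0)).2 + 1 else request

def ivsOf (ivs : List (Int × Int)) (request room : Int) : List (Int × Int) :=
  let lo := bsearchB ivs request ivs.length 0 ivs.length
  let i : Int := (lo : Int) - 1
  let j : Int := i + 1
  let mergeL := decide (0 ≤ i ∧ (PySem.List.pyGetD ivs i (0, 0)).2 = room - 1)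
  let mergeR := decide (j < (ivs.length : Int) ∧ (PySem.List.pyGetD ivs j (0, 0)).1 = room + 1)
  if mergeL && mergeR then
    (PySem.List.pySetD ivs i
      ((PySem.List.pyGetD ivs i (0, 0)).1, (PySem.List.pyGetD ivs j (0, 0)).2)).eraseIdx j.toNat
  else if mergeL then
    PySem.List.pySetD ivs i ((PySem.List.pyGetD ivs i (0, 0)).1, room)
  else if mergeR then
    PySem.List.pySetD ivs j (room, (PySem.List.pyGetD ivs j (0, 0)).2)
  else
    PySem.List.insert ivs j (room, room)

theorem ivsOf_spec (ivs : List (Int × Int)) (request room : Int) (r : Nat)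
    (hr : bsearchB ivs request ivs.length 0 ivs.length = r)
    (hok : IvsOK ivs) (hrle : r ≤ ivs.length)
    (hF1 : 1 ≤ r → sndI ivs (r - 1) ≤ room - 1)
    (hF2 : r < ivs.length → room + 1 ≤ fstI ivs r) :
    IvsOK (ivsOf ivs request room) ∧
    (∀ y, coveredI (ivsOf ivs request room) y ↔ coveredI ivs y ∨ y = room) := by
  unfold ivsOf
  rw [hr]
  have e1 : (r : Int) - 1 + 1 = (r : Int) := by ring
  by_cases hML : 0 ≤ (r : Int) - 1 ∧ (PySem.List.pyGetD ivs ((r : Int) - 1) (0, 0)).2 = room - 1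
  all_goals by_cases hMR : (r : Int) - 1 + 1 < (ivs.length : Int) ∧
      (PySem.List.pyGetD ivs ((r : Int) - 1 + 1) (0, 0)).1 = room + 1
  · -- merge both
    simp only [hML, hMR, and_self, decide_true, Bool.and_self, if_true]
    have h1r : 1 ≤ r := by have := hML.1; omega
    have hrn : r < ivs.length := by have := hMR.1; omega
    have egm1 : PySem.List.pyGetD ivs ((r : Int) - 1) (0, 0) = ivs.getD (r - 1) (0, 0) := by
      have e : ((r : Int) - 1) = ((r - 1 : Nat) : Int) := by omega
      rw [e, PySem.List.pyGetD_natCast]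
    have egr : PySem.List.pyGetD ivs ((r : Int) - 1 + 1) (0, 0) = ivs.getD r (0, 0) := by
      rw [e1, PySem.List.pyGetD_natCast]
    rw [egm1, egr]
    rw [PySem.List.pySetD_of_nonneg ivs _ (by omega : (0:Int) ≤ (r : Int) - 1)]
    rw [show ((r : Int) - 1).toNat = r - 1 from by omega,
      show ((r : Int) - 1 + 1).toNat = r - 1 + 1 from by omega]
    rw [set_eraseIdx_splice ivs (r - 1) _ (by omega)]
    rw [show r - 1 + 2 = r + 1 from by omega]
    have hML2 : sndI ivs (r - 1) = room - 1 := by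
      have h := hML.2; rw [egm1] at h; exact h
    have hMR2 : fstI ivs r = room + 1 := by
      have h := hMR.2; rw [egr] at h; exact h
    have hfs1 : fstI ivs (r - 1) ≤ sndI ivs (r - 1) := hok.1 (r - 1) (by omega)
    have hfsr : fstI ivs r ≤ sndI ivs r := hok.1 r hrn
    obtain ⟨hok', hcov'⟩ := splice_spec ivs (r - 1) (r + 1)
      (fstI ivs (r - 1), sndI ivs r) hok (by omega) (by omega) (by simp only []; omega)
      (by
        intro h0
        have h := hok.2 (r - 1 - 1) (by omega)
        have e : r - 1 - 1 + 1 = r - 1 := by omega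
        rw [e] at h
        simpa using h)
      (by
        intro hb
        have h := hok.2 r (by omega)
        simpa using h)
    refine ⟨hok', ?_⟩
    intro y
    rw [show ((ivs.getD (r - 1) (0, 0)).1, (ivs.getD r (0, 0)).2) = (fstI ivs (r - 1), sndI ivs r) from rfl]
    rw [hcov' y]
    constructor
    · rintro (⟨idx, hidx, hcond, h1', h2'⟩ | ⟨h1', h2'⟩)
      · exact Or.inl ⟨idx, hidx, h1', h2'⟩
      · simp only [] at h1' h2'
        rcases lt_trichotomy y room with hy | hy | hy
        · exact Or.inl ⟨r - 1, by omega, h1', by omega⟩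
        · exact Or.inr hy
        · exact Or.inl ⟨r, by omega, by omega, h2'⟩
    · rintro (⟨idx, hidx, h1', h2'⟩ | rfl)
      · by_cases hi1 : idx < r - 1
        · exact Or.inl ⟨idx, hidx, Or.inl hi1, h1', h2'⟩
        · by_cases hi2 : idx = r - 1
          · subst hi2
            exact Or.inr ⟨by simpa using h1', by simp only []; omega⟩
          · by_cases hi3 : idx = r
            · subst hi3
              exact Or.inr ⟨by simp only []; omega, by simpa using h2'⟩
            · exact Or.inl ⟨idx, hidx, Or.inr (by omega), h1', h2'⟩
      · exact Or.inr ⟨by simp only []; omega, by simp only []; omega⟩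
  · -- merge left only
    simp only [hML, hMR, and_self, decide_true, decide_false, Bool.and_false,
      Bool.false_eq_true, if_true, if_false]
    have h1r : 1 ≤ r := by have := hML.1; omega
    have egm1 : PySem.List.pyGetD ivs ((r : Int) - 1) (0, 0) = ivs.getD (r - 1) (0, 0) := by
      have e : ((r : Int) - 1) = ((r - 1 : Nat) : Int) := by omega
      rw [e, PySem.List.pyGetD_natCast]
    have egr : PySem.List.pyGetD ivs ((r : Int) - 1 + 1) (0, 0) = ivs.getD r (0, 0) := by
      rw [e1, PySem.List.pyGetD_natCast]
    rw [egm1]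
    rw [PySem.List.pySetD_of_nonneg ivs _ (by omega : (0:Int) ≤ (r : Int) - 1)]
    rw [show ((r : Int) - 1).toNat = r - 1 from by omega]
    rw [List.set_eq_take_cons_drop _ (show r - 1 < ivs.length from by omega)]
    rw [show r - 1 + 1 = r from by omega]
    have hML2 : sndI ivs (r - 1) = room - 1 := by
      have h := hML.2; rw [egm1] at h; exact h
    have hfs1 : fstI ivs (r - 1) ≤ sndI ivs (r - 1) := hok.1 (r - 1) (by omega)
    obtain ⟨hok', hcov'⟩ := splice_spec ivs (r - 1) r
      (fstI ivs (r - 1), room) hok (by omega) hrle (by simp only []; omega)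
      (by
        intro h0
        have h := hok.2 (r - 1 - 1) (by omega)
        have e : r - 1 - 1 + 1 = r - 1 := by omega
        rw [e] at h
        simpa using h)
      (by
        intro hb
        have hne : fstI ivs r ≠ room + 1 := by
          intro he
          exact hMR ⟨by omega, by rw [egr]; exact he⟩
        have := hF2 hb
        simp only []
        omega)
    refine ⟨hok', ?_⟩
    intro y
    rw [show ((ivs.getD (r - 1) (0, 0)).1, room) = (fstI ivs (r - 1), room) from rfl]
    rw [hcov' y]
    constructor
    · rintro (⟨idx, hidx, hcond, h1', h2'⟩ | ⟨h1', h2'⟩)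
      · exact Or.inl ⟨idx, hidx, h1', h2'⟩
      · simp only [] at h1' h2'
        rcases eq_or_lt_of_le h2' with hy | hy
        · exact Or.inr hy
        · exact Or.inl ⟨r - 1, by omega, h1', by omega⟩
    · rintro (⟨idx, hidx, h1', h2'⟩ | rfl)
      · by_cases hi1 : idx < r - 1
        · exact Or.inl ⟨idx, hidx, Or.inl hi1, h1', h2'⟩
        · by_cases hi2 : idx = r - 1
          · subst hi2
            exact Or.inr ⟨by simpa using h1', by simp only []; omega⟩
          · exact Or.inl ⟨idx, hidx, Or.inr (by omega), h1', h2'⟩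
      · exact Or.inr ⟨by simp only []; omega, le_refl _⟩
  · -- merge right only
    simp only [hML, hMR, and_self, decide_true, decide_false, Bool.false_and,
      Bool.false_eq_true, if_true, if_false]
    have hrn : r < ivs.length := by have := hMR.1; omega
    have egr : PySem.List.pyGetD ivs ((r : Int) - 1 + 1) (0, 0) = ivs.getD r (0, 0) := by
      rw [e1, PySem.List.pyGetD_natCast]
    rw [egr, e1, PySem.List.pySetD_natCast]
    rw [List.set_eq_take_cons_drop _ hrn]
    have hMR2 : fstI ivs r = room + 1 := by
      have h := hMR.2; rw [egr] at h; exact h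
    have hfsr : fstI ivs r ≤ sndI ivs r := hok.1 r hrn
    obtain ⟨hok', hcov'⟩ := splice_spec ivs r (r + 1)
      (room, sndI ivs r) hok (by omega) (by omega) (by simp only []; omega)
      (by
        intro h0
        have egm1 : PySem.List.pyGetD ivs ((r : Int) - 1) (0, 0) = ivs.getD (r - 1) (0, 0) := by
          have e : ((r : Int) - 1) = ((r - 1 : Nat) : Int) := by omega
          rw [e, PySem.List.pyGetD_natCast]
        have hne : sndI ivs (r - 1) ≠ room - 1 := by
          intro he
          exact hML ⟨by omega, by rw [egm1]; exact he⟩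
        have := hF1 (by omega)
        simp only []
        omega)
      (by
        intro hb
        have h := hok.2 r hb
        simpa using h)
    refine ⟨hok', ?_⟩
    intro y
    rw [show (room, (ivs.getD r (0, 0)).2) = (room, sndI ivs r) from rfl]
    rw [hcov' y]
    constructor
    · rintro (⟨idx, hidx, hcond, h1', h2'⟩ | ⟨h1', h2'⟩)
      · exact Or.inl ⟨idx, hidx, h1', h2'⟩
      · simp only [] at h1' h2'
        rcases eq_or_lt_of_le h1' with hy | hy
        · exact Or.inr hy.symm
        · exact Or.inl ⟨r, by omega, by omega, h2'⟩
    · rintro (⟨idx, hidx, h1', h2'⟩ | rfl)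
      · by_cases hi1 : idx < r
        · exact Or.inl ⟨idx, hidx, Or.inl hi1, h1', h2'⟩
        · by_cases hi2 : idx = r
          · subst hi2
            exact Or.inr ⟨by simp only []; omega, by simpa using h2'⟩
          · exact Or.inl ⟨idx, hidx, Or.inr (by omega), h1', h2'⟩
      · exact Or.inr ⟨le_refl _, by simp only []; omega⟩
  · -- no merge
    simp only [hML, hMR, decide_false, Bool.false_and, Bool.false_eq_true, if_false]
    rw [e1, PySem.List.insert_natCast ivs r (room, room) hrle]
    obtain ⟨hok', hcov'⟩ := splice_spec ivs r r
      (room, room) hok (le_refl r) hrle (le_refl room)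
      (by
        intro h0
        have egm1 : PySem.List.pyGetD ivs ((r : Int) - 1) (0, 0) = ivs.getD (r - 1) (0, 0) := by
          have e : ((r : Int) - 1) = ((r - 1 : Nat) : Int) := by omega
          rw [e, PySem.List.pyGetD_natCast]
        have hne : sndI ivs (r - 1) ≠ room - 1 := by
          intro he
          exact hML ⟨by omega, by rw [egm1]; exact he⟩
        have := hF1 (by omega)
        simp only []
        omega)
      (by
        intro hb
        have egr : PySem.List.pyGetD ivs ((r : Int) - 1 + 1) (0, 0) = ivs.getD r (0, 0) := by
          rw [e1, PySem.List.pyGetD_natCast]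
        have hne : fstI ivs r ≠ room + 1 := by
          intro he
          exact hMR ⟨by omega, by rw [egr]; exact he⟩
        have := hF2 hb
        simp only []
        omega)
    refine ⟨hok', ?_⟩
    intro y
    rw [hcov' y]
    constructor
    · rintro (⟨idx, hidx, hcond, h1', h2'⟩ | ⟨h1', h2'⟩)
      · exact Or.inl ⟨idx, hidx, h1', h2'⟩
      · simp only [] at h1' h2'
        exact Or.inr (by omega)
    · rintro (⟨idx, hidx, h1', h2'⟩ | rfl)
      · exact Or.inl ⟨idx, hidx, by omega, h1', h2'⟩
      · exact Or.inr ⟨le_refl _, le_refl _⟩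

theorem stepB_eq (ans : List Int) (ivs : List (Int × Int)) (request : Int) :
    stepB (ans, ivs) request = (ans ++ [roomOf ivs request], ivsOf ivs request (roomOf ivs request)) := rfl

theorem roomOf_spec (ivs : List (Int × Int)) (request : Int) (hok : IvsOK ivs) :
    bsearchB ivs request ivs.length 0 ivs.length ≤ ivs.length ∧
    request ≤ roomOf ivs request ∧ ¬ coveredI ivs (roomOf ivs request) ∧
    (∀ y, request ≤ y → y < roomOf ivs request → coveredI ivs y) ∧
    (1 ≤ bsearchB ivs request ivs.length 0 ivs.length →
      sndI ivs (bsearchB ivs request ivs.length 0 ivs.length - 1) ≤ roomOf ivs request - 1) ∧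
    (bsearchB ivs request ivs.length 0 ivs.length < ivs.length →
      roomOf ivs request + 1 ≤ fstI ivs (bsearchB ivs request ivs.length 0 ivs.length)) := by
  have hmono : ∀ i j, i ≤ j → j < ivs.length → fstI ivs i ≤ fstI ivs j := by
    intro i j hij hj
    rcases eq_or_lt_of_le hij with rfl | hlt
    · exact le_refl _
    · have h1 := ivs_sep ivs hok i j hlt hj
      have h2 := hok.1 i (by omega)
      omega
  obtain ⟨hrle, Hlow, Hhigh⟩ := bsearch_inv ivs request hmono ivs.length 0 ivs.length
    (Nat.zero_le _) (le_refl _) (by omega)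
    (fun idx h => absurd h (Nat.not_lt_zero idx))
    (fun idx h1 h2 => absurd h2 (by omega))
  set r := bsearchB ivs request ivs.length 0 ivs.length with hrdef
  have hEmax : ∀ idx, 1 ≤ r → idx ≤ r - 1 → sndI ivs idx ≤ sndI ivs (r - 1) := by
    intro idx h1 hidx
    rcases eq_or_lt_of_le hidx with rfl | hlt
    · exact le_refl _
    · have hs := ivs_sep ivs hok idx (r - 1) hlt (by omega)
      have hf := hok.1 (r - 1) (by omega)
      omega
  have hroom : roomOf ivs request =
      if 1 ≤ r ∧ request ≤ sndI ivs (r - 1) then sndI ivs (r - 1) + 1 else request := by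
    unfold roomOf
    rw [← hrdef]
    show (if 0 ≤ (r : Int) - 1 ∧ request ≤ (PySem.List.pyGetD ivs ((r : Int) - 1) (0, 0)).2
      then (PySem.List.pyGetD ivs ((r : Int) - 1) (0, 0)).2 + 1 else request) = _
    by_cases h1 : 1 ≤ r
    · have egm1 : PySem.List.pyGetD ivs ((r : Int) - 1) (0, 0) = ivs.getD (r - 1) (0, 0) := by
        have e : ((r : Int) - 1) = ((r - 1 : Nat) : Int) := by omega
        rw [e, PySem.List.pyGetD_natCast]
      rw [egm1]
      by_cases h2 : request ≤ sndI ivs (r - 1)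
      · rw [if_pos ⟨by omega, h2⟩, if_pos ⟨h1, h2⟩]
        rfl
      · rw [if_neg (fun hc => h2 hc.2), if_neg (fun hc => h2 hc.2)]
    · rw [if_neg (fun hc => h1 (by have := hc.1; omega)),
        if_neg (fun hc => h1 hc.1)]
  refine ⟨hrle, ?_, ?_, ?_, ?_, ?_⟩
  · rw [hroom]
    split_ifs with h
    · have := h.2; omega
    · exact le_refl _
  · rintro ⟨idx, hidx, h1', h2'⟩
    rw [hroom] at h1' h2'
    split_ifs at h1' h2' with h
    · by_cases hidxr : idx ≤ r - 1
      · have := hEmax idx h.1 hidxr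
        omega
      · have hsep := ivs_sep ivs hok (r - 1) idx (by omega) hidx
        omega
    · by_cases hidxr : idx < r
      · have hE := hEmax idx (by omega) (by omega)
        exact h ⟨by omega, by omega⟩
      · have := Hhigh idx (by omega) hidx
        omega
  · intro y hy1 hy2
    rw [hroom] at hy2
    split_ifs at hy2 with h
    · exact ⟨r - 1, by omega, le_trans (Hlow (r - 1) (by omega)) hy1, by omega⟩
    · omega
  · intro h1
    rw [hroom]
    split_ifs with h
    · omega
    · have : ¬ request ≤ sndI ivs (r - 1) := fun hc => h ⟨h1, hc⟩
      omega
  · intro hrn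
    have hhi := Hhigh r (le_refl r) hrn
    rw [hroom]
    split_ifs with h
    · have hsep := ivs_sep ivs hok (r - 1) r (by omega) hrn
      omega
    · omega

-- one B step: answer is the least free room ≥ request, and the room is added to the coverage
theorem stepB_spec (ans : List Int) (ivs : List (Int × Int)) (request : Int)
    (hok : IvsOK ivs) :
    ∃ room ivs',
      stepB (ans, ivs) request = (ans ++ [room], ivs') ∧
      request ≤ room ∧ ¬ coveredI ivs room ∧
      (∀ y, request ≤ y → y < room → coveredI ivs y) ∧
      IvsOK ivs' ∧ (∀ y, coveredI ivs' y ↔ coveredI ivs y ∨ y = room) := by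
  obtain ⟨hrle, h1, h2, h3, hF1, hF2⟩ := roomOf_spec ivs request hok
  obtain ⟨hok', hcov'⟩ := ivsOf_spec ivs request (roomOf ivs request)
    (bsearchB ivs request ivs.length 0 ivs.length) rfl hok hrle hF1 hF2
  exact ⟨roomOf ivs request, ivsOf ivs request (roomOf ivs request),
    stepB_eq ans ivs request, h1, h2, h3, hok', hcov'⟩

-- ---- the fold equality ----

theorem fold_eq :
    ∀ (l ans : List Int) (d : PySem.Dict Int Int) (ivs : List (Int × Int)), RelAB d ivs →
    (l.foldl (fun (st : List Int × PySem.Dict Int Int) request =>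
      let res := chaseA (st.2.size + 2) st.2 request []
      let available := res.2.1 + 1
      (st.1 ++ [res.2.1], res.1.foldl (fun dd r => dd.insert r available) res.2.2)) (ans, d)).1
    = (l.foldl stepB (ans, ivs)).1 := by
  intro l
  induction l with
  | nil => intro ans d ivs _; rfl
  | cons x l ih =>
    intro ans d ivs hrel
    obtain ⟨hinv, hok, hcont⟩ := hrel
    obtain ⟨t, r, hch⟩ := exists_chain d x hinv
    have hchain := chain_increasing d hinv (x :: t) r hch
    have hpw : (x :: t).Pairwise (· < ·) := List.isChain_iff_pairwise.mp hchain
    have hnd : (x :: t).Nodup := hpw.imp (fun h => ne_of_lt h)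
    obtain ⟨q, hq, hqc⟩ := chainOK_shape d (x :: t) r hch
    have hqsub : ∀ y ∈ q, y ∈ d.keys := fun y hy =>
      (PySem.Dict.contains_iff_mem_keys d y).mp (hqc y hy)
    have hqnd : q.Nodup := by
      rw [hq] at hnd
      exact (List.nodup_append.mp hnd).1
    have hkeys : d.keys.length = d.size := by
      simp [PySem.Dict.keys, PySem.Dict.size]
    have hfuel : (x :: t).length ≤ d.size + 2 := by
      have h1 := (List.Nodup.subperm hqnd hqsub).length_le
      have h2 : (x :: t).length = q.length + 1 := by rw [hq]; simp
      omega
    have hA := chain_chaseA d t r x [] (d.size + 2) hch hfuel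
    have hfree : d.contains r = false := chain_root_free d hinv (x :: t) r hch
    have hrmem : r ∈ x :: t := by rw [hq]; simp
    set newd := (x :: t).foldl (fun dd rr => dd.insert rr (r + 1)) (d.insert r r) with hnewd
    have hget : ∀ y, newd.get? y = if y ∈ x :: t then some (r + 1) else d.get? y := by
      intro y
      rw [hnewd, get?_foldl_insert_const (r + 1) (x :: t) (d.insert r r) y]
      by_cases hy : y ∈ x :: t
      · rw [if_pos hy, if_pos hy]
      · rw [if_neg hy, if_neg hy,
          PySem.Dict.get?_insert_of_ne d r (fun he => hy (by rw [he]; exact hrmem))]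
    have hcontn : ∀ y, newd.contains y = true ↔ (d.contains y = true ∨ y = r) := by
      intro y
      rw [PySem.Dict.contains_eq_isSome_get?, hget y]
      by_cases hy : y ∈ x :: t
      · rw [if_pos hy]
        have hy2 : y ∈ q ++ [r] := by rw [← hq]; exact hy
        simp only [Option.isSome_some, true_iff]
        rcases List.mem_append.mp hy2 with h | h
        · exact Or.inl (hqc y h)
        · exact Or.inr (by simpa using h)
      · rw [if_neg hy, ← PySem.Dict.contains_eq_isSome_get?]
        constructor
        · exact Or.inl
        · rintro (h | rfl)
          · exact h
          · exact absurd hrmem hy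
    have hnod : newd.keys.Nodup := by
      rw [hnewd]
      exact PySem.Dict.nodup_keys_foldl_insert (x :: t) (fun _ _ => r + 1) (d.insert r r)
        (PySem.Dict.nodup_keys_insert _ _ _ hinv.1)
    have hinv2 : InvA newd := by
      refine ⟨hnod, ?_⟩
      intro p hp
      have hp2 : (p.1, p.2) ∈ newd.items := by simpa using hp
      have hgp := PySem.Dict.get?_of_mem_items newd hp2 hnod
      rw [hget p.1] at hgp
      by_cases hpx : p.1 ∈ x :: t
      · rw [if_pos hpx] at hgp
        have hpv : p.2 = r + 1 := (Option.some.inj hgp).symm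
        have hel := chain_elems d hinv (x :: t) r hch p.1 hpx
        refine ⟨by omega, ?_⟩
        intro y hy1 hy2
        rw [hpv] at hy2
        by_cases hyr : y = r
        · exact (hcontn y).mpr (Or.inr hyr)
        · exact (hcontn y).mpr (Or.inl (hel.2 y hy1 (by omega)))
      · rw [if_neg hpx] at hgp
        have hmem := PySem.Dict.mem_items_of_get?_eq_some d hgp
        obtain ⟨hlt, hseg⟩ := hinv.2 _ hmem
        exact ⟨hlt, fun y hy1 hy2 => (hcontn y).mpr (Or.inl (hseg y hy1 hy2))⟩
    obtain ⟨room, ivs2, hsB, hreq, hfreeB, hcovB, hok2, hcov2⟩ := stepB_spec ans ivs x hok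
    have helx := chain_elems d hinv (x :: t) r hch x (by simp)
    have hrr : r = room := by
      rcases lt_trichotomy r room with h | h | h
      · have hcv : coveredI ivs r := hcovB r helx.1 h
        have hct := (hcont r).mpr hcv
        rw [hfree] at hct
        exact absurd hct (by simp)
      · exact h
      · have hcr : d.contains room = true := helx.2 room hreq h
        exact absurd ((hcont room).mp hcr) hfreeB
    have hrel2 : RelAB newd ivs2 := by
      refine ⟨hinv2, hok2, ?_⟩
      intro y
      rw [hcontn y, hcov2 y, hcont y, hrr]
    have hstepA :
        (let res := chaseA (d.size + 2) d x []
         let available := res.2.1 + 1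
         (ans ++ [res.2.1], res.1.foldl (fun dd rr => dd.insert rr available) res.2.2))
        = (ans ++ [r], newd) := by
      rw [hA, if_neg (by rw [hfree]; exact Bool.false_ne_true)]
      rfl
    rw [List.foldl_cons, List.foldl_cons]
    simp only at hstepA
    rw [hstepA, hsB, ← hrr]
    exact ih (ans ++ [r]) newd ivs2 hrel2

-- ===== VERDICT (by name: the statement is the Claim_ definition above) =====
theorem solution_spec : Claim_equal_solution := by
  intro k rn _
  unfold Spec_solution solution solution_alt
  have hrel : RelAB PySem.Dict.empty [] := by
    refine ⟨⟨PySem.Dict.nodup_keys_empty, ?_⟩, ⟨by simp, by simp⟩, ?_⟩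
    · intro p hp; simp [PySem.Dict.empty] at hp
    · intro y
      simp [PySem.Dict.contains_empty, coveredI]
  exact fold_eq rn [] PySem.Dict.empty [] hrel
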